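-- pv_equiv track=rewrite | github.com/YoonDosik/Codingtest_practice | programmars/level_1/문자열 나누기.py | solution
-- ===== SOURCE A (Python) =====
-- def solution(s):
--     answer = 0
--     num1, num2 = 0, 0
--
--     for i in range(len(s)):
--         if num1 == num2:
--             answer += 1
--             value = s[i]
--             num1, num2 = 0, 0
--
--         if s[i] == value:
--             num1 += 1
--         if s[i] != value:
--             num2 += 1
--
--     return answer
-- ===== SOURCE B (Python) =====
-- def solution(s):
--     # Count the blocks by repeatedly cutting off the leading block: a block is the
--     # shortest even-length prefix in which the leading character occupies exactly half
--     # of the positions (or the whole remainder if no such prefix exists).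
--     answer = 0
--     rest = s
--     while rest:
--         c = rest[0]
--         n = len(rest)
--         end = n
--         for k in range(2, n + 1, 2):
--             if 2 * rest[:k].count(c) == k:
--                 end = k
--                 break
--         rest = rest[end:]
--         answer += 1
--     return answer
-- ===== Notes on version B (the rewrite author's own statement) =====
-- stated objective: alternative
-- what changed: Instead of A's flat scan carrying two running counters across block boundaries, B repeatedly cuts off the leading block, locating each cut as the shortest even-length prefix in which the leading character fills exactly half of the positions (checked by counting the leader in prefixes), then counts the cuts.
import Mathlib
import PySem

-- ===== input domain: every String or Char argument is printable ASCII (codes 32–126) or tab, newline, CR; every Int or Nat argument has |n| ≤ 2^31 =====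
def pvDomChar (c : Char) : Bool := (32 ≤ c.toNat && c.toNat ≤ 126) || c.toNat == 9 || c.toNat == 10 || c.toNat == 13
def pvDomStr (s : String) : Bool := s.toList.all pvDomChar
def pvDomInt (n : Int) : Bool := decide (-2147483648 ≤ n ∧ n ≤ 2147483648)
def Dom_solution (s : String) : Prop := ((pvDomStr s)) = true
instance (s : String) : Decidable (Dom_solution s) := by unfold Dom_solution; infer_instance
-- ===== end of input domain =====

-- B returns A's value but counts blocks by repeatedly cutting off the leading block, finding each
-- cut as the shortest even-length prefix half-filled by the leading character (alternative).

-- ===== PORT A =====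
-- one loop iteration of A: optional reset (answer += 1, new value = s[i]) then the two counter updates
def solutionStep (st : Int × Int × Int × Char) (ch : Char) : Int × Int × Int × Char :=
  match (if st.2.1 = st.2.2.1 then (st.1 + 1, (0 : Int), (0 : Int), ch) else st) with
  | (answer, num1, num2, value) =>
    (answer, (if ch = value then num1 + 1 else num1),
             (if ch ≠ value then num2 + 1 else num2), value)

-- Python's `value` is unassigned before the loop; the first iteration always assigns it
-- (num1 == num2 holds initially), so the dummy ' ' is never compared before being set.
def solution (s : String) : Int :=
  (s.toList.foldl solutionStep (0, 0, 0, ' ')).1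

-- ===== PORT B =====
-- B's inner `for k in range(2, n+1, 2)` with its break: first k with 2*rest[:k].count(c) == k, else n
def findEnd (rest : List Char) (c : Char) (n : Int) : List Int → Int
  | [] => n
  | k :: ks =>
      if 2 * (PySem.List.count (PySem.List.slice rest none (some k)) c : Int) = k then k
      else findEnd rest c n ks

-- used only by solBlocks' decreasing_by: the loop result is n or an element of the range
lemma findEnd_mem (rest : List Char) (c : Char) (n : Int) :
    ∀ ks : List Int, findEnd rest c n ks = n ∨ findEnd rest c n ks ∈ ks := by
  intro ks
  induction ks with
  | nil => left; rfl
  | cons k ks ih =>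
      rw [findEnd]
      split_ifs
      · right; exact List.mem_cons_self
      · rcases ih with h | h
        · left; exact h
        · right; exact List.mem_cons_of_mem _ h

-- used only by solBlocks' decreasing_by
lemma clampIdx_eq (n : Nat) (a : Int) (h0 : 0 ≤ a) : PySem.List.clampIdx n a = min a.toNat n := by
  simp only [PySem.List.clampIdx]; split_ifs <;> omega

-- B's outer `while rest:` loop; each iteration cuts off one block and counts it
def solBlocks : List Char → Int
  | [] => 0
  | c :: xs =>
      1 + solBlocks (PySem.List.slice (c :: xs)
            (some (findEnd (c :: xs) c ((c :: xs).length : Int)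
              (PySem.List.pyRange 2 (((c :: xs).length : Int) + 1) 2))) none)
termination_by l => l.length
decreasing_by
  rw [PySem.List.slice_some_none]
  rcases findEnd_mem (c :: xs) c ((c :: xs).length : Int)
      (PySem.List.pyRange 2 (((c :: xs).length : Int) + 1) 2) with h | h
  · rw [h, clampIdx_eq _ _ (by positivity)]
    simp
  · rw [PySem.List.mem_pyRange_iff_of_pos (by norm_num)] at h
    rw [clampIdx_eq _ _ (by omega)]
    simp only [List.length_drop, List.length_cons] at h ⊢
    omega

def solution_alt (s : String) : Int := solBlocks s.toList

-- ===== PRECONDITION & SPEC =====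
def Spec_solution (s : String) (out : Int) : Prop := out = solution_alt s
instance (s : String) (out : Int) : Decidable (Spec_solution s out) := by unfold Spec_solution; infer_instance

-- ===== CLAIM (what is proved, stated in full; the proofs are below) =====
def Claim_equal_solution : Prop := ∀ (s : String), Dom_solution s → Spec_solution s (solution s)

-- ===== LEMMAS AND PROOFS =====

-- proof-side canonical recursion: consume one block tracking a running balance
def consumeBlock (c : Char) : List Char → Int → List Char
  | [], _ => []
  | y :: ys, bal =>
      if bal + (if y = c then 1 else -1) = 0 then ys
      else consumeBlock c ys (bal + (if y = c then 1 else -1))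

lemma consumeBlock_len (c : Char) : ∀ (l : List Char) (b : Int),
    (consumeBlock c l b).length ≤ l.length := by
  intro l
  induction l with
  | nil => intro b; simp [consumeBlock]
  | cons y ys ih =>
      intro b
      rw [consumeBlock]
      split_ifs
      all_goals try exact Nat.le_succ_of_le (ih _)
      all_goals simp

def blockCount : List Char → Int
  | [] => 0
  | x :: xs => 1 + blockCount (consumeBlock x xs 1)
termination_by l => l.length
decreasing_by
  have := consumeBlock_len x xs 1
  simp only [List.length_cons]
  omega

-- A's fold equals the canonical block recursion
lemma key (l : List Char) : ∀ (ans n1 n2 : Int) (v : Char),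
    (l.foldl solutionStep (ans, n1, n2, v)).1 =
      ans + (if n1 = n2 then blockCount l
             else blockCount (consumeBlock v l (n1 - n2))) := by
  induction l with
  | nil =>
      intro ans n1 n2 v
      by_cases h : n1 = n2 <;> simp [h, consumeBlock, blockCount]
  | cons x xs ih =>
      intro ans n1 n2 v
      by_cases h : n1 = n2
      · have hs : solutionStep (ans, n1, n2, v) x = (ans + 1, 1, 0, x) := by
          simp [solutionStep, h]
        rw [List.foldl_cons, hs, ih]
        have hb : blockCount (x :: xs) = 1 + blockCount (consumeBlock x xs 1) := by
          rw [blockCount]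
        rw [if_pos h, hb]
        have hc : consumeBlock x xs 1 = consumeBlock x xs (1 - 0) := by norm_num
        rw [if_neg (by norm_num : ¬ (1:Int) = 0), hc]
        ring
      · rw [if_neg h]
        by_cases hx : x = v
        · have hs : solutionStep (ans, n1, n2, v) x = (ans, n1 + 1, n2, v) := by
            simp [solutionStep, h, hx]
          rw [List.foldl_cons, hs, ih]
          have hc : consumeBlock v (x :: xs) (n1 - n2)
              = if n1 - n2 + 1 = 0 then xs else consumeBlock v xs (n1 - n2 + 1) := by
            rw [consumeBlock, if_pos hx]
          rw [hc]
          by_cases hz : n1 + 1 = n2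
          · rw [if_pos hz, if_pos (show n1 - n2 + 1 = 0 by omega)]
          · rw [if_neg hz, if_neg (show ¬ n1 - n2 + 1 = 0 by omega),
                show n1 + 1 - n2 = n1 - n2 + 1 by ring]
        · have hs : solutionStep (ans, n1, n2, v) x = (ans, n1, n2 + 1, v) := by
            simp [solutionStep, h, hx]
          rw [List.foldl_cons, hs, ih]
          have hc : consumeBlock v (x :: xs) (n1 - n2)
              = if n1 - n2 + -1 = 0 then xs else consumeBlock v xs (n1 - n2 + -1) := by
            rw [consumeBlock, if_neg hx]
          rw [hc]
          by_cases hz : n1 = n2 + 1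
          · rw [if_pos hz, if_pos (show n1 - n2 + -1 = 0 by omega)]
          · rw [if_neg hz, if_neg (show ¬ n1 - n2 + -1 = 0 by omega),
                show n1 - (n2 + 1) = n1 - n2 + -1 by ring]

-- step-2 range induction forms
lemma pyRange_two_nil (a b : Int) (h : b ≤ a) : PySem.List.pyRange a b 2 = [] := by
  rw [PySem.List.pyRange_of_pos a b (by norm_num)]
  simp [show ¬ a < b by omega]

lemma pyRange_two_cons (a b : Int) (h : a < b) :
    PySem.List.pyRange a b 2 = a :: PySem.List.pyRange (a + 2) b 2 := by
  rw [PySem.List.pyRange_of_pos a b (by norm_num),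
      PySem.List.pyRange_of_pos (a + 2) b (by norm_num)]
  rw [if_pos h]
  have hn : ((b - a + 2 - 1) / 2).toNat
      = (if a + 2 < b then ((b - (a + 2) + 2 - 1) / 2).toNat else 0) + 1 := by
    split_ifs <;> omega
  rw [hn, List.range_succ_eq_map]
  simp only [List.map_cons, List.map_map]
  refine List.cons_eq_cons.mpr ⟨by push_cast; ring, ?_⟩
  apply List.map_congr_left
  intro k _
  simp [Function.comp, Nat.succ_eq_add_one]
  ring

-- B's cut agrees with the balance-based block consumption
lemma bridge (c : Char) : ∀ (post pre : List Char) (b k0 : Int),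
    b = 1 + 2 * (pre.count c : Int) - (pre.length : Int) →
    Even k0 → (pre.length : Int) + 2 ≤ k0 → k0 ≤ (pre.length : Int) + 3 →
    PySem.List.slice (c :: (pre ++ post))
      (some (findEnd (c :: (pre ++ post)) c (((c :: (pre ++ post)).length : Int))
        (PySem.List.pyRange k0 ((((c :: (pre ++ post)).length : Int)) + 1) 2))) none
    = consumeBlock c post b := by
  intro post
  induction post with
  | nil =>
      intro pre b k0 hb hev h2 h3
      rw [pyRange_two_nil _ _ (by simp; omega), findEnd,
          PySem.List.slice_some_none, clampIdx_eq _ _ (by positivity)]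
      simp [consumeBlock]
  | cons y ys ih =>
      intro pre b k0 hb hev h2 h3
      obtain ⟨r, hr⟩ := hev
      have hcnt : ((pre ++ [y]).count c : Int)
          = (pre.count c : Int) + (if y = c then 1 else 0) := by
        by_cases hy : y = c <;> simp [List.count_append, hy]
      by_cases hk : k0 = (pre.length : Int) + 2
      · -- k0 = |pre| + 2 : the head of the range tests exactly this step
        rw [pyRange_two_cons _ _ (by simp; omega), findEnd]
        have htake : PySem.List.slice (c :: (pre ++ y :: ys)) none (some k0)
            = c :: (pre ++ [y]) := by
          rw [PySem.List.slice_to _ (by omega)]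
          have : k0.toNat = pre.length + 2 := by omega
          rw [this, List.take_succ_cons]
          simp [List.take_append]
        rw [htake]
        have hcount : ((c :: (pre ++ [y])).count c : Int)
            = 1 + (pre.count c : Int) + (if y = c then 1 else 0) := by
          simp only [List.count_cons_self]
          push_cast
          rw [hcnt]
          ring
        by_cases hz : b + (if y = c then 1 else -1) = 0
        · rw [if_pos (by rw [PySem.List.count_eq, hcount]; split_ifs at hz ⊢ <;> omega)]
          rw [consumeBlock, if_pos hz]
          rw [PySem.List.slice_some_none, clampIdx_eq _ _ (by omega)]
          have : k0.toNat = pre.length + 2 := by omega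
          rw [this]
          simp [List.drop_append]
        · rw [if_neg (by rw [PySem.List.count_eq, hcount]; split_ifs at hz ⊢ <;> omega)]
          rw [consumeBlock, if_neg hz]
          have := ih (pre ++ [y]) (b + (if y = c then 1 else -1)) (k0 + 2)
            (by rw [hcnt]; simp; split_ifs <;> omega)
            (⟨r + 1, by omega⟩) (by simp; omega) (by simp; omega)
          simpa [List.append_assoc] using this
      · -- k0 = |pre| + 3 : parity rules out a cut here; the range is unchanged
        have hk3 : k0 = (pre.length : Int) + 3 := by omega
        have hz : ¬ (b + (if y = c then 1 else -1) = 0) := by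
          split_ifs <;> omega
        rw [consumeBlock, if_neg hz]
        have := ih (pre ++ [y]) (b + (if y = c then 1 else -1)) k0
          (by rw [hcnt]; simp; split_ifs <;> omega)
          (⟨r, hr⟩) (by simp; omega) (by simp; omega)
        simpa [List.append_assoc] using this

lemma blockCount_eq_solBlocks : ∀ (N : Nat) (l : List Char), l.length ≤ N →
    blockCount l = solBlocks l := by
  intro N
  induction N with
  | zero =>
      intro l hl
      rw [List.length_eq_zero_iff.mp (Nat.le_zero.mp hl)]
      simp [blockCount, solBlocks]
  | succ N ih =>
      intro l hl
      match l with
      | [] => simp [blockCount, solBlocks]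
      | c :: xs =>
          rw [blockCount, solBlocks]
          have hbr := bridge c xs [] 1 2 (by simp) ⟨1, by ring⟩ (by simp) (by simp)
          simp only [List.nil_append] at hbr
          rw [hbr, ih _ (by have := consumeBlock_len c xs 1; simp at hl; omega)]

-- ===== VERDICT (by name: the statement is the Claim_ definition above) =====
theorem solution_spec : Claim_equal_solution := by
  intro s _
  unfold Spec_solution solution solution_alt
  rw [key, blockCount_eq_solBlocks s.toList.length s.toList le_rfl]
  simp
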